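-- pv_equiv track=rewrite | github.com/elifesciences/sciencebeam-gym | sciencebeam_gym/alignment/align.py | _path_to_matching_blocks
-- ===== SOURCE A (Python) =====
-- def _path_to_matching_blocks(path, a, b):
--   block_ai = 0
--   block_bi = 0
--   block_size = 0
--   for ai, bi in ((ai_ - 1, bi_ - 1) for ai_, bi_ in path):
--     if a[ai] == b[bi]:
--       if block_size and block_ai + block_size == ai and block_bi + block_size == bi:
--         block_size += 1
--       else:
--         if block_size:
--           yield (block_ai, block_bi, block_size)
--         block_ai = ai
--         block_bi = bi
--         block_size = 1
--   if block_size: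
--     yield (block_ai, block_bi, block_size)
-- ===== SOURCE B (Python) =====
-- def _path_to_matching_blocks(path, a, b):
--   # phase 1: materialize matching positions
--   matches = [(ai_ - 1, bi_ - 1) for ai_, bi_ in path if a[ai_ - 1] == b[bi_ - 1]]
--   # phase 2: two-pointer run detection over the diagonal-contiguous runs
--   n = len(matches)
--   i = 0
--   while i < n:
--     start_ai, start_bi = matches[i]
--     j = i + 1
--     while j < n and matches[j][0] == matches[j - 1][0] + 1 and matches[j][1] == matches[j - 1][1] + 1:
--       j += 1
--     yield (start_ai, start_bi, j - i)
--     i = j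
-- ===== Notes on version B (the rewrite author's own statement) =====
-- stated objective: alternative
-- what changed: Replaces A's single interleaved filter-and-merge state machine (block_ai/block_bi/block_size carried across the loop) by a two-phase algorithm: first materialize the list of matching positions, then group diagonal-contiguous runs with a two-pointer scan that measures each run's length directly.
import Mathlib
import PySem

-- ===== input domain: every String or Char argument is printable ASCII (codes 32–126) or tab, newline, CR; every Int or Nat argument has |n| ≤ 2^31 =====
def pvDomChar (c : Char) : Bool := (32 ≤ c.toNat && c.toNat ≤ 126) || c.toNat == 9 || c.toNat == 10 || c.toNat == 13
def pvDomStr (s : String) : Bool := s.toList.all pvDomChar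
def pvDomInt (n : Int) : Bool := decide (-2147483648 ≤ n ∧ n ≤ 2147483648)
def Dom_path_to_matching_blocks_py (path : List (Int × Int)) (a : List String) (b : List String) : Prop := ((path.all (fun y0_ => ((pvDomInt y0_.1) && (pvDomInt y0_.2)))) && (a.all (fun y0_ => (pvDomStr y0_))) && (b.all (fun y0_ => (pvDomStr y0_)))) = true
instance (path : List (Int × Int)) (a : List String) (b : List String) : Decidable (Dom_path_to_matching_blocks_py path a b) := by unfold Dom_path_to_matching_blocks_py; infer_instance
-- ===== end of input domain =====

-- B replaces A's interleaved filter-and-merge state machine by a two-phase algorithm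
-- (materialize matching positions, then group diagonal runs by scanning ahead); alternative, same cost.


-- ===== PORT A =====
-- a[ai] == b[bi]; both indexings via pyGet? (none = IndexError, excluded by Pre_ below)
def pvMatch (a b : List String) (ai bi : Int) : Bool :=
  match PySem.List.pyGet? a ai, PySem.List.pyGet? b bi with
  | some x, some y => x == y
  | _, _ => false

def pvALoop (a b : List String) : List (Int × Int) → Int → Int → Int → List (Int × Int × Int)
  | [], bai, bbi, bsz => if bsz ≠ 0 then [(bai, bbi, bsz)] else []
  | (ai_, bi_) :: rest, bai, bbi, bsz =>
      let ai := ai_ - 1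
      let bi := bi_ - 1
      if pvMatch a b ai bi then
        if bsz ≠ 0 ∧ bai + bsz = ai ∧ bbi + bsz = bi then
          pvALoop a b rest bai bbi (bsz + 1)
        else
          (if bsz ≠ 0 then [(bai, bbi, bsz)] else []) ++ pvALoop a b rest ai bi 1
      else pvALoop a b rest bai bbi bsz

def path_to_matching_blocks_py (path : List (Int × Int)) (a : List String) (b : List String) : List (Int × Int × Int) :=
  pvALoop a b path 0 0 0

-- ===== PORT B =====
-- inner while: scan ahead as long as the next match continues the diagonal run; returns (run length past the first, rest)
def pvTakeRun : Int × Int → List (Int × Int) → Nat × List (Int × Int)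
  | _, [] => (0, [])
  | prev, x :: xs =>
      if x.1 = prev.1 + 1 ∧ x.2 = prev.2 + 1 then
        let r := pvTakeRun x xs
        (r.1 + 1, r.2)
      else (0, x :: xs)

theorem pvTakeRun_len : ∀ (p : Int × Int) (xs : List (Int × Int)), (pvTakeRun p xs).2.length ≤ xs.length := by
  intro p xs
  induction xs generalizing p with
  | nil => simp [pvTakeRun]
  | cons x xs ih =>
      simp only [pvTakeRun]
      split
      · exact Nat.le_trans (ih x) (Nat.le_succ _)
      · exact Nat.le_refl _

-- outer while over the materialized matches
def pvGroup : List (Int × Int) → List (Int × Int × Int)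
  | [] => []
  | x :: xs =>
      let r := pvTakeRun x xs
      (x.1, x.2, ((1 + r.1 : Nat) : Int)) :: pvGroup r.2
termination_by ms => ms.length
decreasing_by
  exact Nat.lt_succ_of_le (pvTakeRun_len x xs)

def path_to_matching_blocks_py_alt (path : List (Int × Int)) (a : List String) (b : List String) : List (Int × Int × Int) :=
  pvGroup (path.filterMap (fun p =>
    let ai := p.1 - 1
    let bi := p.2 - 1
    if pvMatch a b ai bi then some (ai, bi) else none))

-- ===== PRECONDITION & SPEC =====
-- Pre_: every path entry indexes a and b in Python range (else A raises IndexError; B raises there too).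
def Pre_path_to_matching_blocks_py (path : List (Int × Int)) (a : List String) (b : List String) : Prop :=
  ∀ p ∈ path, PySem.Raise.InRange a.length (p.1 - 1) ∧ PySem.Raise.InRange b.length (p.2 - 1)
instance (path : List (Int × Int)) (a : List String) (b : List String) : Decidable (Pre_path_to_matching_blocks_py path a b) := by unfold Pre_path_to_matching_blocks_py; infer_instance
def pvWitness_path_to_matching_blocks_py : (List (Int × Int)) × List String × List String :=
  ([(1, 1), (2, 2)], ["x", "y"], ["x", "y"])
def Spec_path_to_matching_blocks_py (path : List (Int × Int)) (a : List String) (b : List String) (out : List (Int × Int × Int)) : Prop := out = path_to_matching_blocks_py_alt path a b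
instance (path : List (Int × Int)) (a : List String) (b : List String) (out : List (Int × Int × Int)) : Decidable (Spec_path_to_matching_blocks_py path a b out) := by unfold Spec_path_to_matching_blocks_py; infer_instance

-- ===== CLAIM (what is proved, stated in full; the proofs are below) =====
def Claim_equal_path_to_matching_blocks_py : Prop := ∀ (path : List (Int × Int)) (a : List String) (b : List String), Dom_path_to_matching_blocks_py path a b → Pre_path_to_matching_blocks_py path a b → Spec_path_to_matching_blocks_py path a b (path_to_matching_blocks_py path a b)

-- ===== LEMMAS AND PROOFS =====

-- A's loop restricted to the matching positions only
def pvMLoop : List (Int × Int) → Int → Int → Int → List (Int × Int × Int)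
  | [], bai, bbi, bsz => if bsz ≠ 0 then [(bai, bbi, bsz)] else []
  | (ai, bi) :: rest, bai, bbi, bsz =>
      if bsz ≠ 0 ∧ bai + bsz = ai ∧ bbi + bsz = bi then
        pvMLoop rest bai bbi (bsz + 1)
      else
        (if bsz ≠ 0 then [(bai, bbi, bsz)] else []) ++ pvMLoop rest ai bi 1

theorem pvGroup_nil : pvGroup [] = [] := by
  rw [pvGroup]

theorem pvGroup_cons (x : Int × Int) (xs : List (Int × Int)) :
    pvGroup (x :: xs) =
      (x.1, x.2, ((1 + (pvTakeRun x xs).1 : Nat) : Int)) :: pvGroup (pvTakeRun x xs).2 := by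
  rw [pvGroup]

theorem pvALoop_eq_mloop (a b : List String) :
    ∀ (path : List (Int × Int)) (bai bbi bsz : Int),
      pvALoop a b path bai bbi bsz =
        pvMLoop (path.filterMap (fun p =>
          if pvMatch a b (p.1 - 1) (p.2 - 1) then some (p.1 - 1, p.2 - 1) else none)) bai bbi bsz := by
  intro path
  induction path with
  | nil => intro bai bbi bsz; simp [pvALoop, pvMLoop]
  | cons p rest ih =>
      intro bai bbi bsz
      obtain ⟨ai_, bi_⟩ := p
      by_cases hm : pvMatch a b (ai_ - 1) (bi_ - 1) = true
      · simp [pvALoop, hm, pvMLoop, ih]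
      · simp [pvALoop, hm, ih]

theorem pvMLoop_run :
    ∀ (ms : List (Int × Int)) (bai bbi bsz : Int), 1 ≤ bsz →
      pvMLoop ms bai bbi bsz =
        (bai, bbi, bsz + ((pvTakeRun (bai + bsz - 1, bbi + bsz - 1) ms).1 : Int)) ::
          pvGroup (pvTakeRun (bai + bsz - 1, bbi + bsz - 1) ms).2 := by
  intro ms
  induction ms with
  | nil =>
      intro bai bbi bsz h
      simp only [pvMLoop, pvTakeRun]
      rw [if_pos (show bsz ≠ 0 by omega), pvGroup_nil]
      simp
  | cons x rest ih =>
      intro bai bbi bsz h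
      obtain ⟨ai, bi⟩ := x
      simp only [pvMLoop, pvTakeRun]
      by_cases hc : bai + bsz = ai ∧ bbi + bsz = bi
      · rw [if_pos ⟨by omega, hc.1, hc.2⟩,
            if_pos (show ai = bai + bsz - 1 + 1 ∧ bi = bbi + bsz - 1 + 1 by omega)]
        rw [ih bai bbi (bsz + 1) (by omega)]
        have h1 : bai + (bsz + 1) - 1 = ai := by omega
        have h2 : bbi + (bsz + 1) - 1 = bi := by omega
        rw [h1, h2]
        simp only [List.cons.injEq, Prod.mk.injEq, and_true, true_and]
        push_cast
        omega
      · rw [if_neg (fun hx => hc ⟨hx.2.1, hx.2.2⟩),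
            if_pos (show bsz ≠ 0 by omega),
            if_neg (show ¬(ai = bai + bsz - 1 + 1 ∧ bi = bbi + bsz - 1 + 1) by
              intro hx; exact hc ⟨by omega, by omega⟩),
            ih ai bi 1 (by omega)]
        have h1 : ai + 1 - 1 = ai := by omega
        have h2 : bi + 1 - 1 = bi := by omega
        rw [h1, h2, pvGroup_cons]
        simp only [List.cons_append, List.nil_append, List.cons.injEq, Prod.mk.injEq, and_true, true_and]
        push_cast
        omega

theorem pvMLoop_zero (ms : List (Int × Int)) : pvMLoop ms 0 0 0 = pvGroup ms := by
  cases ms with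
  | nil => simp [pvMLoop, pvGroup_nil]
  | cons x rest =>
      obtain ⟨ai, bi⟩ := x
      simp only [pvMLoop]
      rw [if_neg (by simp), if_neg (by simp)]
      rw [pvMLoop_run rest ai bi 1 (by omega)]
      have h1 : ai + 1 - 1 = ai := by omega
      have h2 : bi + 1 - 1 = bi := by omega
      rw [h1, h2, pvGroup_cons]
      simp only [List.nil_append, List.cons.injEq, Prod.mk.injEq, and_true, true_and]
      push_cast
      omega

-- ===== VERDICT (by name: the statement is the Claim_ definition above) =====
theorem path_to_matching_blocks_py_spec : Claim_equal_path_to_matching_blocks_py := by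
  intro path a b _ _
  unfold Spec_path_to_matching_blocks_py path_to_matching_blocks_py path_to_matching_blocks_py_alt
  rw [pvALoop_eq_mloop, pvMLoop_zero]
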